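-- pv_equiv track=rewrite | github.com/leberhartphillips/bdot_stable_isotopes | scripts/extract_assay_qc_adjudication.py | classify_green_pattern
-- ===== SOURCE A (Python) =====
-- def classify_green_pattern(rows):
--     green_flags = [bool(row.get("row_has_green_any")) for row in rows]
--     if not any(green_flags):
--         return "no_green"
--     if all(green_flags):
--         return "all_rows_green"
--
--     green_rows = [row for row in rows if row.get("row_has_green_any")]
--     if green_rows and all(row.get("is_repeat") for row in green_rows):
--         return "rpt_only_green"
--     if green_rows and all(not row.get("is_repeat") for row in green_rows):
--         return "non_rpt_only_green"
--     return "mixed_green"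
-- ===== SOURCE B (Python) =====
-- def classify_green_pattern(rows):
--     total = green = grep = gnon = 0
--     for row in rows:
--         total += 1
--         if row.get("row_has_green_any"):
--             green += 1
--             if row.get("is_repeat"):
--                 grep += 1
--             else:
--                 gnon += 1
--     if green == 0:
--         return "no_green"
--     if green == total:
--         return "all_rows_green"
--     if grep == green:
--         return "rpt_only_green"
--     if gnon == green:
--         return "non_rpt_only_green"
--     return "mixed_green"
-- ===== Notes on version B (the rewrite author's own statement) =====
-- stated objective: simpler
-- what changed: B replaces A's four separate list passes (any, all, a filtered green_rows list, and two all-scans over it) by one pass maintaining four integer counters, classifying from the counts alone.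
import Mathlib
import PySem

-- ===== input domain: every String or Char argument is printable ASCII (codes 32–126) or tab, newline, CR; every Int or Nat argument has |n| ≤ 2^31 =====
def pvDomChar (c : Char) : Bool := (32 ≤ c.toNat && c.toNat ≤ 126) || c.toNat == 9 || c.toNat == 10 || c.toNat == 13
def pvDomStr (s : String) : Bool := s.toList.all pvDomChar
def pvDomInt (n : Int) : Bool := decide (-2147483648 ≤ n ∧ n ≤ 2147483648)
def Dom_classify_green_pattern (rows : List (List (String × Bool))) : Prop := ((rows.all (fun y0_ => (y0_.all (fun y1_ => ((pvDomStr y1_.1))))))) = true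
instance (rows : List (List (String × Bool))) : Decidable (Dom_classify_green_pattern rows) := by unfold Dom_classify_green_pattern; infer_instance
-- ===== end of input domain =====

-- B replaces A's four separate passes (any/all/filter + two all-scans) by one counting pass; objective: simpler.

-- row.get(k) truthiness: bool(row.get(k)) with Bool values, missing key → False
def pvRowGet (row : List (String × Bool)) (k : String) : Bool :=
  PySem.Dict.getD (PySem.Dict.mk row) k false

-- ===== PORT A =====
def classify_green_pattern (rows : List (List (String × Bool))) : String :=
  let greenFlags := rows.map (fun row => pvRowGet row "row_has_green_any")
  if ¬ (greenFlags.any id) then "no_green"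
  else if greenFlags.all id then "all_rows_green"
  else
    let greenRows := rows.filter (fun row => pvRowGet row "row_has_green_any")
    if greenRows ≠ [] ∧ greenRows.all (fun row => pvRowGet row "is_repeat") then "rpt_only_green"
    else if greenRows ≠ [] ∧ greenRows.all (fun row => !pvRowGet row "is_repeat") then "non_rpt_only_green"
    else "mixed_green"

-- ===== PORT B =====
def classify_green_pattern_alt (rows : List (List (String × Bool))) : String :=
  let st := rows.foldl (fun (s : Int × Int × Int × Int) row =>
    let total := s.1 + 1
    if pvRowGet row "row_has_green_any" then
      if pvRowGet row "is_repeat" then (total, s.2.1 + 1, s.2.2.1 + 1, s.2.2.2)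
      else (total, s.2.1 + 1, s.2.2.1, s.2.2.2 + 1)
    else (total, s.2.1, s.2.2.1, s.2.2.2)) (0, 0, 0, 0)
  if st.2.1 = 0 then "no_green"
  else if st.2.1 = st.1 then "all_rows_green"
  else if st.2.2.1 = st.2.1 then "rpt_only_green"
  else if st.2.2.2 = st.2.1 then "non_rpt_only_green"
  else "mixed_green"

-- ===== PRECONDITION & SPEC =====
def Spec_classify_green_pattern (rows : List (List (String × Bool))) (out : String) : Prop := out = classify_green_pattern_alt rows
instance (rows : List (List (String × Bool))) (out : String) : Decidable (Spec_classify_green_pattern rows out) := by unfold Spec_classify_green_pattern; infer_instance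

-- ===== CLAIM (what is proved, stated in full; the proofs are below) =====
def Claim_equal_classify_green_pattern : Prop := ∀ (rows : List (List (String × Bool))), Dom_classify_green_pattern rows → Spec_classify_green_pattern rows (classify_green_pattern rows)

-- ===== LEMMAS AND PROOFS =====

def pvG (row : List (String × Bool)) : Bool := pvRowGet row "row_has_green_any"
def pvR (row : List (String × Bool)) : Bool := pvRowGet row "is_repeat"

-- the fold computes the four counts
theorem pv_fold_eq (rows : List (List (String × Bool))) (t g gr gn : Int) :
    rows.foldl (fun (s : Int × Int × Int × Int) row =>
      let total := s.1 + 1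
      if pvRowGet row "row_has_green_any" then
        if pvRowGet row "is_repeat" then (total, s.2.1 + 1, s.2.2.1 + 1, s.2.2.2)
        else (total, s.2.1 + 1, s.2.2.1, s.2.2.2 + 1)
      else (total, s.2.1, s.2.2.1, s.2.2.2)) (t, g, gr, gn)
    = (t + rows.length,
       g + ((rows.filter pvG).length : Int),
       gr + (((rows.filter pvG).filter pvR).length : Int),
       gn + (((rows.filter pvG).filter (fun r => !pvR r)).length : Int)) := by
  induction rows generalizing t g gr gn with
  | nil => simp
  | cons x xs ih =>
    simp only [List.foldl_cons, List.filter_cons, List.length_cons]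
    by_cases hg : pvG x
    · by_cases hr : pvR x
      · simp only [pvG, pvR] at hg hr
        rw [ih]
        simp [pvG, pvR, hg, hr]
        and_intros <;> first | trivial | ring
      · simp only [pvG, pvR] at hg hr
        rw [ih]
        simp [pvG, pvR, hg, hr]
        and_intros <;> first | trivial | ring
    · simp only [pvG] at hg
      rw [ih]
      simp [pvG, hg]
      ring
  
theorem pv_len_filter_eq_zero (l : List (List (String × Bool))) (p : List (String × Bool) → Bool) :
    ((l.filter p).length = 0) ↔ ¬ (l.any p) := by
  simp [List.length_eq_zero_iff, List.filter_eq_nil_iff, List.any_eq_true]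

theorem pv_len_filter_eq_len (l : List (List (String × Bool))) (p : List (String × Bool) → Bool) :
    ((l.filter p).length = l.length) ↔ l.all p := by
  constructor
  · intro h
    rw [List.all_eq_true]
    intro x hx
    by_contra hpx
    have h2 := (List.length_filter_lt_length_iff_exists (l := l) (p := p)).mpr ⟨x, hx, hpx⟩
    omega
  · intro h
    rw [List.filter_eq_self.mpr (by simpa [List.all_eq_true] using h)]

theorem classify_green_pattern_spec : Claim_equal_classify_green_pattern := by
  intro rows _
  unfold Spec_classify_green_pattern classify_green_pattern classify_green_pattern_alt
  rw [pv_fold_eq]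
  simp only [zero_add,
    show (fun row => pvRowGet row "row_has_green_any") = pvG from rfl,
    show (fun row => pvRowGet row "is_repeat") = pvR from rfl,
    show (fun row => !pvRowGet row "is_repeat") = (fun r => !pvR r) from rfl]
  have hmap : (rows.map pvG).any id = rows.any pvG := by simp [List.any_map]
  have hmapall : (rows.map pvG).all id = rows.all pvG := by simp [List.all_map]
  simp only [hmap, hmapall, Nat.cast_eq_zero, Nat.cast_inj, ne_eq, ← List.length_eq_zero_iff,
    pv_len_filter_eq_zero, pv_len_filter_eq_len]
  split_ifs <;> tauto
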